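-- pv_equiv track=rewrite | github.com/HaydnLogan/proximity-matcher | trioDrop_07b.py | extract_origins
-- ===== SOURCE A (Python) =====
-- def extract_origins(columns):
--     origins = {}
--     for col in columns:
--         col = col.strip().lower()
--         if col in ["time", "open"]:
--             continue
--         if any(suffix in col for suffix in [" h", " l", " c"]):
--             bracket = ""
--             if "[" in col and "]" in col:
--                 bracket = col[col.find("["):col.find("]")+1]
--             core = col.replace(" h", "").replace(" l", "").replace(" c", "")
--             group_id = core + bracket
--             origins.setdefault(group_id, []).append(col)
--     return {origin: cols for origin, cols in origins.items() if len(cols) == 3}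
-- ===== SOURCE B (Python) =====
-- SUFFIXES = (" h", " l", " c")
--
--
-- def _group_id(col):
--     """Group id of an already-normalised qualifying column."""
--     core = col
--     for suf in SUFFIXES:
--         core = core.replace(suf, "")
--     if "[" in col and "]" in col:
--         core += col[col.find("["):col.find("]") + 1]
--     return core
--
--
-- def _qualifies(col):
--     return col != "time" and col != "open" and (
--         " h" in col or " l" in col or " c" in col)
--
--
-- def extract_origins(columns):
--     normed = [c.strip().lower() for c in columns]
--     pairs = [(_group_id(c), c) for c in normed if _qualifies(c)]
--     out = {}
--     for g in dict.fromkeys(g for g, _ in pairs):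
--         trio = [c for h, c in pairs if h == g]
--         if len(trio) == 3:
--             out[g] = trio
--     return out
-- ===== Notes on version B (the rewrite author's own statement) =====
-- stated objective: alternative
-- what changed: Replaces A's single-pass dict setdefault accumulation by staged passes: normalise every column, keep qualifying ones as (group_id, col) pairs via dedicated _group_id/_qualifies helpers (suffix stripping done by a loop over the suffix tuple), dedup the group ids in first-occurrence order, then gather each group's columns by a scan over the pairs, keeping groups of exactly three.
import Mathlib
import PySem

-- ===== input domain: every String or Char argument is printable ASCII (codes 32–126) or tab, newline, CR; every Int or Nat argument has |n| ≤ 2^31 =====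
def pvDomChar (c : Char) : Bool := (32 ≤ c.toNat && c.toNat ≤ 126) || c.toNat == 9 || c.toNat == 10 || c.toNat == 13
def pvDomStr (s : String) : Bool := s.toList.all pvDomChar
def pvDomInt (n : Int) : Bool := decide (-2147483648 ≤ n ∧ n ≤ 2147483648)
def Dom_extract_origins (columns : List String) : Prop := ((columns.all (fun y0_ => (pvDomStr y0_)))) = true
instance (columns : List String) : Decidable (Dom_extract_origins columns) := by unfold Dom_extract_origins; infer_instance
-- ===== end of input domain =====

-- B replaces A's single-pass setdefault accumulation by staged passes: normalise all columns,
-- keep the qualifying ones as (group_id, col) pairs, then gather each first-occurrence-distinct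
-- group id by a scan over the pairs (objective: alternative decomposition, same results).

-- ===== PORT A =====
-- A's loop body, step for step (named so the proofs can refer to it)
def pvStepA (d : PySem.Dict String (List String)) (col : String) : PySem.Dict String (List String) :=
  let col := PySem.Str.lower (PySem.Str.strip col)
  if col == "time" || col == "open" then d
  else if [" h", " l", " c"].any (fun suffix => PySem.Str.isIn suffix col) then
    let bracket :=
      if PySem.Str.isIn "[" col && PySem.Str.isIn "]" col then
        PySem.Str.slice col (some (PySem.Str.find col "[")) (some (PySem.Str.find col "]" + 1))
      else ""
    let core := PySem.Str.replace (PySem.Str.replace (PySem.Str.replace col " h" "") " l" "") " c" ""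
    let group_id := core ++ bracket
    -- origins.setdefault(group_id, []).append(col): d[k] = d.get(k, []) + [col]  (exact)
    d.modify group_id [] (· ++ [col])
  else d

def extract_origins (columns : List String) : List (String × List String) :=
  let origins := columns.foldl pvStepA PySem.Dict.empty
  origins.items.filter (fun p => p.2.length == 3)

-- ===== PORT B =====
-- _group_id: strip the three suffixes, then add the bracket tag when present
def pvGroupId (col : String) : String :=
  let core := [" h", " l", " c"].foldl (fun s suf => PySem.Str.replace s suf "") col
  if PySem.Str.isIn "[" col && PySem.Str.isIn "]" col then
    core ++ PySem.Str.slice col (some (PySem.Str.find col "[")) (some (PySem.Str.find col "]" + 1))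
  else core

-- _qualifies: not time/open, and carries one of the three suffixes
def pvQualifies (col : String) : Bool :=
  !(col == "time") && !(col == "open") &&
    (PySem.Str.isIn " h" col || PySem.Str.isIn " l" col || PySem.Str.isIn " c" col)

def extract_origins_alt (columns : List String) : List (String × List String) :=
  let normed := columns.map (fun c => PySem.Str.lower (PySem.Str.strip c))
  let pairs := (normed.filter pvQualifies).map (fun c => (pvGroupId c, c))
  -- dict.fromkeys(...) = first-occurrence dedup of the group ids; out only sees fresh keys,
  -- so each dict assignment appends (exact)
  (PySem.List.dedup (pairs.map (·.1))).foldl (fun out g =>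
    let trio := (pairs.filter (fun q => q.1 == g)).map (·.2)
    if trio.length == 3 then out ++ [(g, trio)] else out) []

-- ===== PRECONDITION & SPEC =====
def Spec_extract_origins (columns : List String) (out : List (String × List String)) : Prop := out = extract_origins_alt columns
instance (columns : List String) (out : List (String × List String)) : Decidable (Spec_extract_origins columns out) := by unfold Spec_extract_origins; infer_instance

-- ===== CLAIM (what is proved, stated in full; the proofs are below) =====
def Claim_equal_extract_origins : Prop := ∀ (columns : List String), Dom_extract_origins columns → Spec_extract_origins columns (extract_origins columns)

-- ===== LEMMAS AND PROOFS =====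

-- proof-layer normal form of one column: none if skipped, else (group id, normalised column)
def pvNormP (raw : String) : Option (String × String) :=
  let col := PySem.Str.lower (PySem.Str.strip raw)
  if pvQualifies col then some (pvGroupId col, col) else none

-- Bool-level bridges between B's helpers and A's inline expressions
theorem pvQualifies_eq (c : String) :
    pvQualifies c
      = (!(c == "time" || c == "open")
          && [" h", " l", " c"].any (fun suffix => PySem.Str.isIn suffix c)) := by
  unfold pvQualifies
  cases h1 : (c == "time") <;> cases h2 : (c == "open") <;>
    simp [List.any, Bool.or_assoc]

theorem pvGroupId_eq (c : String) :
    pvGroupId c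
      = PySem.Str.replace (PySem.Str.replace (PySem.Str.replace c " h" "") " l" "") " c" ""
          ++ (if PySem.Str.isIn "[" c && PySem.Str.isIn "]" c then
                PySem.Str.slice c (some (PySem.Str.find c "[")) (some (PySem.Str.find c "]" + 1))
              else "") := by
  unfold pvGroupId
  cases hb : (PySem.Str.isIn "[" c && PySem.Str.isIn "]" c) <;> simp [List.foldl]

theorem pvStepA_eq (d : PySem.Dict String (List String)) (col : String) :
    pvStepA d col = match pvNormP col with
      | some p => d.modify p.1 [] (· ++ [p.2])
      | none => d := by
  unfold pvStepA pvNormP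
  dsimp only
  rw [pvQualifies_eq, pvGroupId_eq]
  cases h1 : (PySem.Str.lower (PySem.Str.strip col) == "time"
      || PySem.Str.lower (PySem.Str.strip col) == "open") <;>
    cases h2 : ([" h", " l", " c"].any
        (fun suffix => PySem.Str.isIn suffix (PySem.Str.lower (PySem.Str.strip col)))) <;>
    simp_all

theorem pvFoldA_eq (columns : List String) (d : PySem.Dict String (List String)) :
    columns.foldl pvStepA d
      = (columns.filterMap pvNormP).foldl (fun d p => d.modify p.1 [] (· ++ [p.2])) d := by
  induction columns generalizing d with
  | nil => rfl
  | cons c cs ih =>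
    simp only [List.foldl_cons, List.filterMap_cons, pvStepA_eq]
    cases h : pvNormP c with
    | none => simp [ih]
    | some p => simp [ih]

theorem pvPairs_eq (columns : List String) :
    ((columns.map (fun c => PySem.Str.lower (PySem.Str.strip c))).filter pvQualifies).map
        (fun c => (pvGroupId c, c))
      = columns.filterMap pvNormP := by
  induction columns with
  | nil => rfl
  | cons c cs ih =>
    rw [List.map_cons, List.filter_cons, List.filterMap_cons]
    by_cases h : pvQualifies (PySem.Str.lower (PySem.Str.strip c)) = true
    · have hn : pvNormP c = some (pvGroupId (PySem.Str.lower (PySem.Str.strip c)),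
          PySem.Str.lower (PySem.Str.strip c)) := by
        unfold pvNormP; simp [h]
      rw [if_pos h, List.map_cons, ih, hn]
    · have hn : pvNormP c = none := by
        unfold pvNormP; simp [h]
      rw [if_neg (by simpa using h), ih, hn]

theorem pvItems_eq_map_keys (d : PySem.Dict String (List String)) (h : d.keys.Nodup) :
    d.items = d.keys.map (fun k => (k, d.getD k [])) := by
  simp only [PySem.Dict.keys] at *
  rw [List.map_map]
  have hc : ∀ p ∈ d.items, ((fun k => (k, d.getD k [])) ∘ (fun x => x.1)) p = id p := by
    intro p hp
    have hg : d.get? p.1 = some p.2 := by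
      apply PySem.Dict.get?_of_mem_items
      · exact hp
      · simpa [PySem.Dict.keys] using h
    simp [Function.comp, PySem.Dict.getD_eq_get?_getD, hg]
  rw [List.map_congr_left hc, List.map_id]

-- characterisation of A's dict: items = (dedup of gids) paired with their gathered columns
theorem pvDict_items (ps : List (String × String)) :
    ((ps.foldl (fun d p => d.modify p.1 [] (· ++ [p.2])) PySem.Dict.empty).items)
      = (PySem.List.dedup (ps.map (·.1))).map
          (fun g => (g, (ps.filter (fun q => q.1 == g)).map (·.2))) := by
  have hkeys : (ps.foldl (fun d p => d.modify p.1 [] (· ++ [p.2])) PySem.Dict.empty).keys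
      = PySem.List.dedup (ps.map (·.1)) := by
    rw [PySem.Dict.keys_foldl_modify_key ps (key := Prod.fst)
      (d0 := []) (f := fun _ p => (· ++ [p.2])) (d := PySem.Dict.empty)]
    simp [PySem.Set.update, PySem.Set.ofList_eq_foldl]
  have hnodup : (ps.foldl (fun d p => d.modify p.1 [] (· ++ [p.2])) PySem.Dict.empty).keys.Nodup := by
    rw [hkeys]; exact PySem.List.nodup_dedup _
  rw [pvItems_eq_map_keys _ hnodup, hkeys]
  apply List.map_congr_left
  intro g _
  rw [PySem.Dict.getD_foldl_modify_append]
  simp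

theorem pvB_fold_eq (pairs : List (String × String)) (gids : List String) :
    (gids.foldl (fun res g =>
        if ((pairs.filter (fun q => q.1 == g)).map (·.2)).length == 3
        then res ++ [(g, (pairs.filter (fun q => q.1 == g)).map (·.2))] else res) [])
      = ((gids.map (fun g => (g, (pairs.filter (fun q => q.1 == g)).map (·.2)))).filter
          (fun p => p.2.length == 3)) := by
  rw [PySem.List.foldl_append_if
    (p := fun g => ((pairs.filter (fun q => q.1 == g)).map (·.2)).length == 3)
    (f := fun g => (g, (pairs.filter (fun q => q.1 == g)).map (·.2)))]
  rw [List.filter_map]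
  simp only [Function.comp_def, List.nil_append]

-- ===== VERDICT (by name: the statement is the Claim_ definition above) =====
theorem extract_origins_spec : Claim_equal_extract_origins := by
  intro columns _
  show extract_origins columns = extract_origins_alt columns
  simp only [extract_origins, extract_origins_alt]
  rw [pvPairs_eq, pvFoldA_eq, pvDict_items, pvB_fold_eq]
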